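-- pv_equiv track=rewrite | github.com/brxxlstxrs/mpython | fun.py | subm
-- ===== SOURCE A (Python) =====
-- def subm(line, phrase):
--     '''Функция ищет букавы в одной строке текста
--         и пишет те которые есть в тексте на тех
--         местах где они встретелись,
--         заменяя остальныепробелами'''
--     buff = ''
--     line, phrase = map(str, [line, phrase])
--     phrase = phrase.replace(' ', '')
--     for letter in phrase:
--         if letter in line:
--             n = line.find(letter)
--             buff += ' ' * n + line[n]
--             line = line[n + 1:]
--             phrase = phrase[1:]
--     return buff, phrase
-- ===== SOURCE B (Python) =====
-- def subm(line, phrase):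
--     line, phrase = str(line), str(phrase)
--     p = phrase.replace(' ', '')
--     # phase 1: collect the absolute match positions with one forward cursor
--     hits = []
--     i = 0
--     for letter in p:
--         j = line.find(letter, i)
--         if j != -1:
--             hits.append((j, letter))
--             i = j + 1
--     # phase 2: render the buffer from the position list
--     buff = []
--     prev = 0
--     for j, letter in hits:
--         buff.append(' ' * (j - prev))
--         buff.append(letter)
--         prev = j + 1
--     return ''.join(buff), p[len(hits):]
-- ===== Notes on version B (the rewrite author's own statement) =====
-- stated objective: faster
-- what changed: B splits the work into two staged passes - first a single forward cursor over the unmodified line collecting the (position, letter) match list, then a separate rendering pass that turns that list into the padded buffer - instead of A's one loop that re-slices the line and does an 'in'-substring scan plus find on the shrinking slice for every phrase letter.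
import Mathlib
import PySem

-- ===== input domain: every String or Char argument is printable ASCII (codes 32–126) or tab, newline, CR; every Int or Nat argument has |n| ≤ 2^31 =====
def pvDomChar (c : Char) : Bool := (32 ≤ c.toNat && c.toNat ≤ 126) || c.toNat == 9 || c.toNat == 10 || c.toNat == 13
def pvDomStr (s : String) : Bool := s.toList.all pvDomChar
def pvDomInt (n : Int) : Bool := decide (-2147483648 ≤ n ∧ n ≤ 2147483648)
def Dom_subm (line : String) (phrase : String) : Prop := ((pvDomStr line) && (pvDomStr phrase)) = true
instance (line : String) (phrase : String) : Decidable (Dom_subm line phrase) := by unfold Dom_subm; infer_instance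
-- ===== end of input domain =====

-- B replaces A's slice-and-search loop with two staged passes: collect the (position, letter)
-- match list with one forward cursor, then render the padded buffer from that list (objective: faster).


-- ===== PORT A =====
-- loop body of A: state = (buff, line, phrase); 'letter in line' for a single char is membership;
-- line.find(letter) = idxOf (in range since letter ∈ line, so getD's default is never used);
-- line[n+1:], phrase[1:] = drop
def subm_step (st : List Char × List Char × List Char) (letter : Char) : List Char × List Char × List Char :=
  if letter ∈ st.2.1 then
    let n := st.2.1.idxOf letter
    (st.1 ++ List.replicate n ' ' ++ [st.2.1.getD n ' '], st.2.1.drop (n + 1), st.2.2.drop 1)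
  else st

def subm (line : String) (phrase : String) : List String :=
  -- phrase.replace(' ', '') removes every space — exact as a filter
  let p := phrase.toList.filter (fun c => c ≠ ' ')
  let r := p.foldl subm_step ([], line.toList, p)
  [String.ofList r.1, String.ofList r.2.2]

-- ===== PORT B =====
-- phase 1 of B: walk the phrase letters with a cursor i into the fixed line,
-- collecting absolute match positions; line.find(letter, i) = idxOf? on drop i
def subm_hits (L : List Char) : List Char → Nat → List (Nat × Char)
  | [], _ => []
  | letter :: rest, i =>
    match (L.drop i).idxOf? letter with
    | some k => (i + k, letter) :: subm_hits L rest (i + k + 1)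
    | none => subm_hits L rest i

-- phase 2 of B: render the buffer from the (position, letter) list
def subm_render : Nat → List (Nat × Char) → List Char
  | _, [] => []
  | prev, (j, letter) :: rest => List.replicate (j - prev) ' ' ++ letter :: subm_render (j + 1) rest

def subm_alt (line : String) (phrase : String) : List String :=
  let p := phrase.toList.filter (fun c => c ≠ ' ')
  let hits := subm_hits line.toList p 0
  [String.ofList (subm_render 0 hits), String.ofList (p.drop hits.length)]

-- ===== PRECONDITION & SPEC =====
def Spec_subm (line : String) (phrase : String) (out : List String) : Prop := out = subm_alt line phrase
instance (line : String) (phrase : String) (out : List String) : Decidable (Spec_subm line phrase out) := by unfold Spec_subm; infer_instance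

-- ===== CLAIM =====
def Claim_equal_subm : Prop := ∀ (line : String) (phrase : String), Dom_subm line phrase → Spec_subm line phrase (subm line phrase)

-- ===== LEMMAS AND PROOFS =====

-- A's fold equals buff ++ B's rendered hits, with the leftover phrase dropped by the hit count
theorem fold_hits (L : List Char) (p : List Char) :
    ∀ (letters : List Char) (buff : List Char) (i m : Nat),
      ∃ i', letters.foldl subm_step (buff, L.drop i, p.drop m) =
        (buff ++ subm_render i (subm_hits L letters i), L.drop i',
         p.drop (m + (subm_hits L letters i).length)) := by
  intro letters
  induction letters with
  | nil => intro buff i m; exact ⟨i, by simp [List.foldl, subm_hits, subm_render]⟩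
  | cons letter rest ih =>
    intro buff i m
    simp only [List.foldl, subm_hits]
    by_cases h : letter ∈ L.drop i
    · have hne : (L.drop i).idxOf? letter ≠ none := by
        simp only [ne_eq, List.idxOf?_eq_none_iff]; simpa using h
      obtain ⟨k, hk⟩ := Option.ne_none_iff_exists'.mp hne
      have hkeq : (L.drop i).idxOf letter = k := by
        rw [List.idxOf_eq_getD_idxOf?, hk]; rfl
      have hget : (L.drop i).getD k ' ' = letter := by
        have hg := List.getElem?_idxOf (a := letter) (l := L.drop i) h
        rw [hkeq] at hg
        simp [List.getD, hg]
      rw [show subm_step (buff, L.drop i, p.drop m) letter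
            = (buff ++ List.replicate k ' ' ++ [letter],
               L.drop (i + k + 1), p.drop (m + 1)) by
            simp only [subm_step, if_pos h, hkeq, hget, List.drop_drop, List.drop_drop]
            rw [show i + (k + 1) = i + k + 1 by omega, show m + 1 = 1 + m by omega]]
      rw [hk]
      simp only [subm_render, List.length_cons]
      obtain ⟨i', hi'⟩ := ih (buff ++ List.replicate k ' ' ++ [letter]) (i + k + 1) (m + 1)
      refine ⟨i', ?_⟩
      rw [hi']
      rw [show m + 1 + (subm_hits L rest (i + k + 1)).length
            = m + ((subm_hits L rest (i + k + 1)).length + 1) by omega]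
      simp
    · have hidx : (L.drop i).idxOf? letter = none := by
        simpa [List.idxOf?_eq_none_iff] using h
      rw [show subm_step (buff, L.drop i, p.drop m) letter = (buff, L.drop i, p.drop m) by
            simp [subm_step, h]]
      rw [hidx]
      exact ih buff i m

-- ===== VERDICT =====
theorem subm_spec : Claim_equal_subm := by
  intro line phrase _
  unfold Spec_subm
  obtain ⟨i', h⟩ := fold_hits line.toList (phrase.toList.filter (fun c => c ≠ ' '))
    (phrase.toList.filter (fun c => c ≠ ' ')) [] 0 0
  simp only [List.drop_zero] at h
  simp only [subm, subm_alt]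
  rw [h]
  simp
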